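-- pv_equiv track=rewrite | github.com/yutianlee/opsf | tests/test_dawson.py | _split_complex_text
-- ===== SOURCE A (Python) =====
-- def _split_complex_text(text: str) -> tuple[str, str]:
--     body = text[:-1]
--     if body in {"", "+"}:
--         return "0", "1"
--     if body == "-":
--         return "0", "-1"
--
--     split_at = None
--     for index in range(len(body) - 1, 0, -1):
--         if body[index] in "+-" and body[index - 1] not in "eE":
--             split_at = index
--             break
--     if split_at is None:
--         return "0", _normalize_imaginary_component(body)
--     return body[:split_at], _normalize_imaginary_component(body[split_at:])
--
-- def _normalize_imaginary_component(value: str) -> str: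
--     if value in {"", "+"}:
--         return "1"
--     if value == "-":
--         return "-1"
--     return value
-- ===== SOURCE B (Python) =====
-- def _split_complex_text(text: str) -> tuple[str, str]:
--     body = text[:-1]
--     if body in {"", "+"}:
--         return "0", "1"
--     if body == "-":
--         return "0", "-1"
--
--     # Mask every sign that belongs to an exponent ("e+", "e-", "E+", "E-") with '#',
--     # then the split point is simply the right-most remaining sign (not at position 0).
--     masked = (body.replace("e+", "e#").replace("e-", "e#")
--                   .replace("E+", "E#").replace("E-", "E#"))
--     split_at = max(masked.rfind("+", 1), masked.rfind("-", 1))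
--     if split_at == -1:
--         return "0", _normalize_imaginary_component(body)
--     return body[:split_at], _normalize_imaginary_component(body[split_at:])
--
-- def _normalize_imaginary_component(value: str) -> str:
--     if value in {"", "+"}:
--         return "1"
--     if value == "-":
--         return "-1"
--     return value
-- ===== Notes on version B (the rewrite author's own statement) =====
-- stated objective: faster
-- what changed: A's backward per-character index loop is replaced by staged string rewriting: all exponent signs (e+/e-/E+/E-) are first masked out with str.replace, after which the split point is just the right-most remaining sign found by str.rfind with start 1 (no explicit character loop at all).
import Mathlib
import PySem

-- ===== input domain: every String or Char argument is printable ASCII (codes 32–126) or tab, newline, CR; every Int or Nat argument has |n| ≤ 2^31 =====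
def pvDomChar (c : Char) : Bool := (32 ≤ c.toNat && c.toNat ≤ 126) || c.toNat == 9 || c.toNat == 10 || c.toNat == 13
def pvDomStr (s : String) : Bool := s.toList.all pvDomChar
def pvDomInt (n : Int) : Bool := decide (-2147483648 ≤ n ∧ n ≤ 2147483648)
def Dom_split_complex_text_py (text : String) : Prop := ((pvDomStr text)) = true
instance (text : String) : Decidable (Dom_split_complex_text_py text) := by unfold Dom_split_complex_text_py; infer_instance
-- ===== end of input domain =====

-- B replaces A's backward per-character index loop by staged string rewriting: mask the
-- exponent signs e+/e-/E+/E- with str.replace, then take the right-most remaining sign via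
-- str.rfind(start=1); same O(n), measurably faster by a constant factor (built-in scans).


-- ===== PORT A =====
-- shared same-module helper _normalize_imaginary_component (both Pythons call it)
def pvNormalize (value : List Char) : String :=
  if value = [] ∨ value = ['+'] then "1"
  else if value = ['-'] then "-1"
  else String.ofList value

-- loop test: body[index] in "+-" and body[index-1] not in "eE" (called only with index ≥ 1, both indices in range)
def pvCondA (body : List Char) (i : Nat) : Bool :=
  (body[i]?.any fun c => c == '+' || c == '-') && !(body[i-1]?.any fun c => c == 'e' || c == 'E')

-- for index in range(len(body)-1, 0, -1): if cond: split_at = index; break  — first hit scanning downward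
def pvScanA (body : List Char) : Nat → Option Nat
  | 0 => none
  | i+1 => if pvCondA body (i+1) then some (i+1) else pvScanA body i

def split_complex_text_py (text : String) : String × String :=
  let body := PySem.List.slice text.toList none (some (-1))  -- text[:-1]
  if body = [] ∨ body = ['+'] then ("0", "1")
  else if body = ['-'] then ("0", "-1")
  else
    match pvScanA body (body.length - 1) with
    | none => ("0", pvNormalize body)
    | some i => (String.ofList (body.take i), pvNormalize (body.drop i))  -- body[:i] / body[i:], i ≥ 0: take/drop exact

-- ===== PORT B =====
def split_complex_text_py_alt (text : String) : String × String :=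
  let body := PySem.List.slice text.toList none (some (-1))  -- text[:-1]
  if body = [] ∨ body = ['+'] then ("0", "1")
  else if body = ['-'] then ("0", "-1")
  else
    -- body.replace("e+","e#").replace("e-","e#").replace("E+","E#").replace("E-","E#")
    let masked := PySem.Chars.replace (PySem.Chars.replace (PySem.Chars.replace
        (PySem.Chars.replace body ['e','+'] ['e','#']) ['e','-'] ['e','#'])
        ['E','+'] ['E','#']) ['E','-'] ['E','#']
    -- max(masked.rfind("+", 1), masked.rfind("-", 1))
    let split_at : Int := max (PySem.Chars.rfindFrom masked ['+'] 1 none)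
                              (PySem.Chars.rfindFrom masked ['-'] 1 none)
    if split_at = -1 then ("0", pvNormalize body)
    else (String.ofList (body.take split_at.toNat),      -- body[:split_at], split_at ≥ 1: take exact
          pvNormalize (body.drop split_at.toNat))        -- body[split_at:]

-- ===== PRECONDITION & SPEC =====
def Spec_split_complex_text_py (text : String) (out : String × String) : Prop := out = split_complex_text_py_alt text
instance (text : String) (out : String × String) : Decidable (Spec_split_complex_text_py text out) := by unfold Spec_split_complex_text_py; infer_instance

-- ===== CLAIM (what is proved, stated in full; the proofs are below) =====
def Claim_equal_split_complex_text_py : Prop := ∀ (text : String), Dom_split_complex_text_py text → Spec_split_complex_text_py text (split_complex_text_py text)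

-- ===== LEMMAS AND PROOFS =====

-- the effect of s.replace(p+q, p+r) for a 2-character pattern: non-overlapping, left to right
def pvMask2 (p q r : Char) : List Char → List Char
  | [] => []
  | [a] => [a]
  | a :: b :: t => if a = p ∧ b = q then p :: r :: pvMask2 p q r t else a :: pvMask2 p q r (b :: t)

theorem pvReplaceGo_eq (p q r : Char) :
    ∀ (fuel : Nat) (l acc : List Char), l.length ≤ fuel →
      PySem.Chars.replace.go [p,q] [p,r] fuel l acc = acc.reverse ++ pvMask2 p q r l := by
  intro fuel
  induction fuel with
  | zero =>
      intro l acc h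
      have : l = [] := by cases l <;> simp_all
      subst this
      simp [PySem.Chars.replace.go, pvMask2]
  | succ fuel ih =>
      intro l acc h
      match l with
      | [] => simp [PySem.Chars.replace.go, pvMask2]
      | c :: t =>
        rw [PySem.Chars.replace.go]
        by_cases hp : ([p,q] : List Char).isPrefixOf (c :: t) = true
        · rcases t with _ | ⟨b, t2⟩
          · simp [List.isPrefixOf] at hp
          · simp only [List.isPrefixOf, Bool.and_true,
              Bool.and_eq_true, beq_iff_eq] at hp
            obtain ⟨hc, hb⟩ := hp
            rw [← hc, ← hb]
            rw [if_pos (by simp [List.isPrefixOf] : ([p,q] : List Char).isPrefixOf (p :: q :: t2) = true)]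
            have hlen : t2.length ≤ fuel := by simp at h; omega
            rw [show List.drop (List.length ([p,q] : List Char)) (p :: q :: t2) = t2 from rfl]
            rw [ih t2 (([p,r] : List Char).reverse ++ acc) hlen]
            simp [pvMask2]
        · rw [if_neg hp]
          have hlen : t.length ≤ fuel := by simp at h; omega
          rw [ih t (c :: acc) hlen]
          rcases t with _ | ⟨b, t2⟩
          · simp [pvMask2]
          · have hne : ¬ (c = p ∧ b = q) := by
              intro ⟨h1, h2⟩; subst h1; subst h2
              simp [List.isPrefixOf] at hp
            simp [pvMask2, hne]

theorem pvReplace_eq (p q r : Char) (l : List Char) :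
    PySem.Chars.replace l [p,q] [p,r] = pvMask2 p q r l := by
  rw [PySem.Chars.replace]
  simp only [List.isEmpty_cons, if_false, Bool.false_eq_true]
  exact pvReplaceGo_eq p q r l.length l [] le_rfl

theorem pvMask2_length (p q r : Char) (l : List Char) :
    (pvMask2 p q r l).length = l.length := by
  induction l using pvMask2.induct p q with
  | case1 => rfl
  | case2 a => rfl
  | case3 a b t h ih => simp [pvMask2, h, ih]
  | case4 a b t h ih => simp only [pvMask2, if_neg h, List.length_cons, ih]

theorem pvMask2_get? (p q r : Char) (hpq : p ≠ q) (l : List Char) :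
    ∀ i, (pvMask2 p q r l)[i]? =
      if 1 ≤ i ∧ l[i-1]? = some p ∧ l[i]? = some q then some r else l[i]? := by
  induction l using pvMask2.induct p q with
  | case1 => intro i; simp [pvMask2]
  | case2 a =>
      intro i
      match i with
      | 0 => simp [pvMask2]
      | j+1 => simp [pvMask2]
  | case3 a b t h ih =>
      intro i
      obtain ⟨ha, hb⟩ := h
      rw [ha, hb]
      match i with
      | 0 => simp [pvMask2]
      | 1 => simp [pvMask2]
      | j+2 =>
        rw [show pvMask2 p q r (p :: q :: t) = p :: r :: pvMask2 p q r t from by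
          simp [pvMask2]]
        rw [show (p :: r :: pvMask2 p q r t)[j+2]? = (pvMask2 p q r t)[j]? by simp]
        rw [ih j]
        match j with
        | 0 => simp [Ne.symm hpq]
        | k+1 =>
          simp only [show (k+1+2) - 1 = k+2 by omega, show (k+1) - 1 = k by omega]
          simp
  | case4 a b t h ih =>
      intro i
      match i with
      | 0 => simp [pvMask2, if_neg h]
      | j+1 =>
        rw [show pvMask2 p q r (a :: b :: t) = a :: pvMask2 p q r (b :: t) from by
          simp [pvMask2, if_neg h]]
        rw [show (a :: pvMask2 p q r (b :: t))[j+1]? = (pvMask2 p q r (b :: t))[j]? by simp]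
        rw [ih j]
        match j with
        | 0 =>
          split_ifs with hc1 hc2 <;> simp_all
        | k+1 =>
          simp only [show (k+1+1) - 1 = k+1 by omega, show (k+1) - 1 = k by omega]
          simp

-- a character other than the replacement r and the sign q passes through pvMask2 unchanged
theorem pvMask2_get?_of_ne (p q r c : Char) (hpq : p ≠ q) (hcr : c ≠ r) (hcq : c ≠ q)
    (l : List Char) (i : Nat) :
    ((pvMask2 p q r l)[i]? = some c) ↔ l[i]? = some c := by
  rw [pvMask2_get? p q r hpq l i]
  split_ifs with hcond
  · constructor
    · intro h; exact absurd (Option.some.inj h).symm hcr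
    · intro h; rw [hcond.2.2] at h; exact absurd (Option.some.inj h).symm hcq
  · exact Iff.rfl

-- the sign q survives pvMask2 exactly when it is not preceded by p
theorem pvMask2_get?_sign (p q r : Char) (hpq : p ≠ q) (hqr : q ≠ r)
    (l : List Char) (i : Nat) :
    ((pvMask2 p q r l)[i]? = some q) ↔ (l[i]? = some q ∧ ¬ (1 ≤ i ∧ l[i-1]? = some p)) := by
  rw [pvMask2_get? p q r hpq l i]
  split_ifs with hcond
  · constructor
    · intro h; exact absurd (Option.some.inj h).symm hqr
    · intro ⟨_, hn⟩; exact absurd ⟨hcond.1, hcond.2.1⟩ hn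
  · constructor
    · intro h
      refine ⟨h, fun ⟨h1, h2⟩ => hcond ⟨h1, h2, h⟩⟩
    · intro ⟨h, _⟩; exact h

-- the full mask: body.replace("e+","e#").replace("e-","e#").replace("E+","E#").replace("E-","E#")
def pvMaskAll (body : List Char) : List Char :=
  pvMask2 'E' '-' '#' (pvMask2 'E' '+' '#' (pvMask2 'e' '-' '#' (pvMask2 'e' '+' '#' body)))

theorem pvMaskAll_length (body : List Char) : (pvMaskAll body).length = body.length := by
  unfold pvMaskAll
  rw [pvMask2_length, pvMask2_length, pvMask2_length, pvMask2_length]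

theorem pvMaskAll_plus (body : List Char) (i : Nat) :
    ((pvMaskAll body)[i]? = some '+') ↔
      (body[i]? = some '+' ∧ ¬ (1 ≤ i ∧ body[i-1]? = some 'e') ∧ ¬ (1 ≤ i ∧ body[i-1]? = some 'E')) := by
  unfold pvMaskAll
  rw [pvMask2_get?_of_ne 'E' '-' '#' '+' (by decide) (by decide) (by decide)]
  rw [pvMask2_get?_sign 'E' '+' '#' (by decide) (by decide)]
  rw [pvMask2_get?_of_ne 'e' '-' '#' '+' (by decide) (by decide) (by decide)]
  rw [pvMask2_get?_sign 'e' '+' '#' (by decide) (by decide)]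
  have hE : ((pvMask2 'e' '-' '#' (pvMask2 'e' '+' '#' body))[i-1]? = some 'E') ↔ body[i-1]? = some 'E' := by
    rw [pvMask2_get?_of_ne 'e' '-' '#' 'E' (by decide) (by decide) (by decide)]
    rw [pvMask2_get?_of_ne 'e' '+' '#' 'E' (by decide) (by decide) (by decide)]
  rw [hE]
  tauto

theorem pvMaskAll_minus (body : List Char) (i : Nat) :
    ((pvMaskAll body)[i]? = some '-') ↔
      (body[i]? = some '-' ∧ ¬ (1 ≤ i ∧ body[i-1]? = some 'e') ∧ ¬ (1 ≤ i ∧ body[i-1]? = some 'E')) := by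
  unfold pvMaskAll
  rw [pvMask2_get?_sign 'E' '-' '#' (by decide) (by decide)]
  rw [pvMask2_get?_of_ne 'E' '+' '#' '-' (by decide) (by decide) (by decide)]
  rw [pvMask2_get?_sign 'e' '-' '#' (by decide) (by decide)]
  rw [pvMask2_get?_of_ne 'e' '+' '#' '-' (by decide) (by decide) (by decide)]
  have hE : ((pvMask2 'E' '+' '#' (pvMask2 'e' '-' '#' (pvMask2 'e' '+' '#' body)))[i-1]? = some 'E') ↔ body[i-1]? = some 'E' := by
    rw [pvMask2_get?_of_ne 'E' '+' '#' 'E' (by decide) (by decide) (by decide)]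
    rw [pvMask2_get?_of_ne 'e' '-' '#' 'E' (by decide) (by decide) (by decide)]
    rw [pvMask2_get?_of_ne 'e' '+' '#' 'E' (by decide) (by decide) (by decide)]
  rw [hE]
  have he : ((pvMask2 'e' '+' '#' body)[i-1]? = some 'e') ↔ body[i-1]? = some 'e' :=
    pvMask2_get?_of_ne 'e' '+' '#' 'e' (by decide) (by decide) (by decide) body (i-1)
  rw [he]
  tauto

-- a sign at position i ≥ 1 in the masked string is exactly A's loop condition at i
theorem pvMaskAll_sign (body : List Char) (i : Nat) (hi : 1 ≤ i) :
    (((pvMaskAll body)[i]? == some '+') || ((pvMaskAll body)[i]? == some '-')) = pvCondA body i := by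
  rw [Bool.eq_iff_iff]
  simp only [Bool.or_eq_true, beq_iff_eq]
  rw [pvMaskAll_plus, pvMaskAll_minus]
  unfold pvCondA
  cases hbi : body[i]? with
  | none => simp
  | some c =>
    cases hbp : body[i-1]? with
    | none => simp [hi]
    | some d =>
      simp only [Option.any_some, Bool.and_eq_true, Bool.or_eq_true,
        Bool.not_eq_true', Bool.or_eq_false_iff, beq_iff_eq, beq_eq_false_iff_ne,
        Option.some.injEq, hi, true_and]
      tauto

-- generic backward scan from m down to 1, first index satisfying P
def pvBscan (P : Nat → Bool) : Nat → Option Nat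
  | 0 => none
  | j+1 => if P (j+1) then some (j+1) else pvBscan P j

def pvOInt : Option Nat → Int
  | none => -1
  | some i => i

theorem pvScanA_eq_bscan (body : List Char) : ∀ m, pvScanA body m = pvBscan (pvCondA body) m := by
  intro m
  induction m with
  | zero => rfl
  | succ m ih => simp only [pvScanA, pvBscan, ih]

theorem pvBscan_le (P : Nat → Bool) : ∀ m, pvOInt (pvBscan P m) ≤ m := by
  intro m
  induction m with
  | zero => simp [pvBscan, pvOInt]
  | succ m ih =>
      simp only [pvBscan]
      by_cases h : P (m+1) = true
      · simp [h, pvOInt]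
      · rw [if_neg h]
        exact le_trans ih (by exact_mod_cast Nat.le_succ m)

theorem pvBscan_pos (P : Nat → Bool) : ∀ m i, pvBscan P m = some i → 1 ≤ i := by
  intro m
  induction m with
  | zero => intro i h; simp [pvBscan] at h
  | succ m ih =>
      intro i h
      simp only [pvBscan] at h
      split_ifs at h with hc
      · have : m + 1 = i := Option.some.inj h
        omega
      · exact ih i h

theorem pvBscan_congr (P Q : Nat → Bool) (h : ∀ i, 1 ≤ i → P i = Q i) :
    ∀ m, pvBscan P m = pvBscan Q m := by
  intro m
  induction m with
  | zero => rfl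
  | succ m ih => simp only [pvBscan, h (m+1) (by omega), ih]

-- [c].isPrefixOf (s.drop k) tests s[k] = c
theorem pvPrefix_drop (s : List Char) (c : Char) (k : Nat) :
    ([c] : List Char).isPrefixOf (s.drop k) = (s[k]? == some c) := by
  have h0 : (s.drop k)[0]? = s[k]? := by
    rw [List.getElem?_drop]; simp
  cases hd : s.drop k with
  | nil => rw [hd] at h0; simp [List.isPrefixOf, ← h0]
  | cons a t =>
      rw [hd] at h0
      simp only [List.isPrefixOf, Bool.and_true, ← h0,
        List.getElem?_cons_zero]
      by_cases hca : c = a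
      · subst hca; simp
      · simp [hca, Ne.symm hca]

theorem pvRfindGo_shift (s : List Char) (c : Char) :
    ∀ j, (if PySem.Chars.rfind.go (s.drop 1) [c] j = -1 then (-1 : Int)
          else 1 + PySem.Chars.rfind.go (s.drop 1) [c] j)
         = pvOInt (pvBscan (fun i => s[i]? == some c) (j+1)) := by
  intro j
  induction j with
  | zero =>
      rw [PySem.Chars.rfind.go]
      rw [show ([c] : List Char).isPrefixOf (s.drop 1) = (([c] : List Char).isPrefixOf ((s.drop 1).drop 0)) by rw [List.drop_zero]]
      rw [pvPrefix_drop (s.drop 1) c 0]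
      rw [show (s.drop 1)[0]? = s[1]? by rw [List.getElem?_drop]]
      simp only [pvBscan]
      cases h : (s[1]? == some c) <;> simp [pvOInt]
  | succ j ih =>
      rw [PySem.Chars.rfind.go]
      rw [show (s.drop 1).drop (j+1) = s.drop (j+2) from by
        rw [List.drop_drop]; simp only [show 1 + (j+1) = j+2 from by omega]]
      rw [pvPrefix_drop s c (j+2)]
      have hb : pvBscan (fun i => s[i]? == some c) (j+1+1)
          = if (s[j+2]? == some c) then some (j+2) else pvBscan (fun i => s[i]? == some c) (j+1) := by
        simp only [pvBscan]
      rw [hb]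
      cases h : (s[j+2]? == some c) with
      | false =>
          simp only [Bool.false_eq_true, if_false]
          exact ih
      | true =>
          simp only [if_true]
          rw [if_neg (by push_cast; omega)]
          simp only [pvOInt]
          push_cast
          ring

theorem pvRfindFrom1 (s : List Char) (c : Char) (hs : s ≠ []) :
    PySem.Chars.rfindFrom s [c] 1 none =
      pvOInt (pvBscan (fun i => s[i]? == some c) (s.length - 1)) := by
  have hlen : 1 ≤ s.length := List.length_pos_iff.mpr hs
  rw [PySem.Chars.rfindFrom]
  simp only [show ¬((1:Int) < 0) from by norm_num, if_false]
  rw [if_neg (by omega : ¬ ((s.length : Int) < 1))]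
  rw [show ((1 : Int)).toNat = 1 from rfl]
  rw [show ((s.length : Int)).toNat = s.length by simp]
  rw [List.take_length]
  rw [PySem.Chars.rfind]
  have hdl : (s.drop 1).length = s.length - 1 := by simp
  rw [hdl]
  have := pvRfindGo_shift s c (s.length - 1)
  rw [show s.length - 1 + 1 = s.length by omega] at this
  -- one step of pvBscan at s.length: s[s.length]? = none, so it recurses to s.length - 1
  have hstep : pvBscan (fun i => s[i]? == some c) s.length
      = pvBscan (fun i => s[i]? == some c) (s.length - 1) := by
    rw [show s.length = (s.length - 1) + 1 by omega]
    simp only [pvBscan]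
    rw [if_neg (by simp [show s.length - 1 + 1 = s.length by omega])]
    simp only [show s.length - 1 + 1 - 1 = s.length - 1 from by omega]
  rw [hstep] at this
  rw [← this]

theorem pvMax_bscan (s : List Char) :
    ∀ m, max (pvOInt (pvBscan (fun i => s[i]? == some '+') m))
             (pvOInt (pvBscan (fun i => s[i]? == some '-') m))
         = pvOInt (pvBscan (fun i => (s[i]? == some '+') || (s[i]? == some '-')) m) := by
  intro m
  induction m with
  | zero => rfl
  | succ m ih =>
      simp only [pvBscan]
      by_cases hp : (s[m+1]? == some '+') = true
      · have hp' : s[m+1]? = some '+' := by rwa [beq_iff_eq] at hp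
        rw [if_pos hp, if_neg (by simp [hp']), if_pos (by simp [hp'])]
        simp only [pvOInt]
        have hb := pvBscan_le (fun i => s[i]? == some '-') m
        exact max_eq_left (le_trans hb (by push_cast; omega))
      · by_cases hm : (s[m+1]? == some '-') = true
        · rw [if_neg hp, if_pos hm, if_pos (by simp only [Bool.or_eq_true]; exact Or.inr hm)]
          simp only [pvOInt]
          have hb := pvBscan_le (fun i => s[i]? == some '+') m
          exact max_eq_right (le_trans hb (by push_cast; omega))
        · rw [if_neg hp, if_neg hm, if_neg (by simp only [Bool.or_eq_true]; tauto)]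
          exact ih

-- ===== VERDICT (by name: the statement is the Claim_ definition above) =====
theorem split_complex_text_py_spec : Claim_equal_split_complex_text_py := by
  intro text _
  unfold Spec_split_complex_text_py split_complex_text_py split_complex_text_py_alt
  set body := PySem.List.slice text.toList none (some (-1)) with hbody
  by_cases h1 : body = [] ∨ body = ['+']
  · simp [h1]
  · simp only [if_neg h1]
    by_cases h2 : body = ['-']
    · simp [h2]
    · simp only [if_neg h2]
      have hne : body ≠ [] := by intro h; exact h1 (Or.inl h)
      have hrep : PySem.Chars.replace (PySem.Chars.replace (PySem.Chars.replace
          (PySem.Chars.replace body ['e','+'] ['e','#']) ['e','-'] ['e','#'])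
          ['E','+'] ['E','#']) ['E','-'] ['E','#'] = pvMaskAll body := by
        rw [pvReplace_eq, pvReplace_eq, pvReplace_eq, pvReplace_eq]; rfl
      rw [hrep]
      have hmne : pvMaskAll body ≠ [] := by
        intro h
        have := pvMaskAll_length body
        rw [h] at this
        exact hne (List.length_eq_zero_iff.mp this.symm)
      rw [pvRfindFrom1 _ _ hmne, pvRfindFrom1 _ _ hmne, pvMaskAll_length, pvMax_bscan]
      rw [pvBscan_congr _ (pvCondA body) (fun i hi => pvMaskAll_sign body i hi) (body.length - 1)]
      rw [← pvScanA_eq_bscan]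
      cases hscan : pvScanA body (body.length - 1) with
      | none => simp [pvOInt]
      | some i =>
          have hi : 1 ≤ i := by
            rw [pvScanA_eq_bscan] at hscan
            exact pvBscan_pos _ _ _ hscan
          simp only [pvOInt, Int.toNat_natCast]
          rw [if_neg (show ¬((i : Int) = -1) from by omega)]
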